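-- pv_equiv track=rewrite | github.com/purelevenexim-ai/ANNASEOv1 | engines/kw2/keyword_generator.py | _prioritize_anchor_modifiers
-- ===== SOURCE A (Python) =====
-- def _prioritize_anchor_modifiers(modifiers: list[str]) -> list[str]:
--     priority = {
--         "organic": 0,
--         "natural": 1,
--         "premium": 2,
--         "bulk": 3,
--         "wholesale": 4,
--         "supplier": 5,
--         "online": 6,
--         "price": 7,
--     }
--     unique: list[str] = []
--     seen: set[str] = set()
--     for modifier in modifiers or []:
--         mod = str(modifier).strip().lower()
--         if mod and mod not in seen:
--             seen.add(mod)
--             unique.append(mod)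
--     return sorted(unique, key=lambda mod: (priority.get(mod, 100), mod))
-- ===== SOURCE B (Python) =====
-- _PRIORITY_ORDER = ["organic", "natural", "premium", "bulk", "wholesale", "supplier", "online", "price"]
--
--
-- def _prioritize_anchor_modifiers(modifiers: list[str]) -> list[str]:
--     cleaned: set[str] = set()
--     for modifier in modifiers or []:
--         mod = str(modifier).strip().lower()
--         if mod:
--             cleaned.add(mod)
--     head = [w for w in _PRIORITY_ORDER if w in cleaned]
--     tail = sorted(cleaned.difference(_PRIORITY_ORDER))
--     return head + tail
-- ===== Notes on version B (the rewrite author's own statement) =====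
-- stated objective: alternative
-- what changed: B replaces A's single (priority, word) key-based insertion sort of the deduplicated modifiers by an ordered scan over the fixed eight-word priority list (kept in its hard-coded order) followed by an alphabetical sort of only the remaining unknown modifiers, concatenating the two parts.
import Mathlib
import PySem

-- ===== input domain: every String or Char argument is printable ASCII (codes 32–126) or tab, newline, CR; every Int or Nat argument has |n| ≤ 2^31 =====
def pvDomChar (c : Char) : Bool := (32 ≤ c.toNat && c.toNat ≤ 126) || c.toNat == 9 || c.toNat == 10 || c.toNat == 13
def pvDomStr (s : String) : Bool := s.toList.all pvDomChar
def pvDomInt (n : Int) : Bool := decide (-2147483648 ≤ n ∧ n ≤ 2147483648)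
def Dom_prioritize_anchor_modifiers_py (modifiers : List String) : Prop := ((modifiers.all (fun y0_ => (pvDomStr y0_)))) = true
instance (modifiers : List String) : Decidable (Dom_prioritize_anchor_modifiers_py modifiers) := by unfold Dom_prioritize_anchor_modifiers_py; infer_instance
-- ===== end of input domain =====

-- B replaces A's single key-based sort of the deduplicated modifiers by an ordered scan of the
-- fixed priority list plus an alphabetical sort of the remaining modifiers (objective: alternative).

-- ===== PORT A =====
def prioritize_anchor_modifiers_py (modifiers : List String) : List String :=
  let priority : PySem.Dict String Int := PySem.Dict.ofList
    [("organic", 0), ("natural", 1), ("premium", 2), ("bulk", 3),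
     ("wholesale", 4), ("supplier", 5), ("online", 6), ("price", 7)]
  -- 'modifiers or []' iterates modifiers itself (an empty list is falsy, and [] is iterated instead)
  let st := modifiers.foldl (fun (st : List String × PySem.Set String) modifier =>
      let mod := PySem.Str.lower (PySem.Str.strip modifier)
      if mod ≠ "" && !(PySem.Set.contains st.2 mod) then
        (st.1 ++ [mod], PySem.Set.add st.2 mod)
      else st)
    ([], PySem.Set.empty)
  PySem.List.sorted2 st.1 (fun mod => priority.getD mod 100) (fun mod => mod) false

-- ===== PORT B =====
def pvPriorityOrder : List String :=
  ["organic", "natural", "premium", "bulk", "wholesale", "supplier", "online", "price"]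

def prioritize_anchor_modifiers_py_alt (modifiers : List String) : List String :=
  let cleaned : PySem.Set String := modifiers.foldl (fun s modifier =>
      let mod := PySem.Str.lower (PySem.Str.strip modifier)
      if mod ≠ "" then PySem.Set.add s mod else s)
    PySem.Set.empty
  let head := pvPriorityOrder.filter (fun w => PySem.Set.contains cleaned w)
  let tail := PySem.List.sorted (PySem.Set.diff cleaned pvPriorityOrder) (fun x => x) false
  head ++ tail

-- ===== PRECONDITION & SPEC =====
def Spec_prioritize_anchor_modifiers_py (modifiers : List String) (out : List String) : Prop := out = prioritize_anchor_modifiers_py_alt modifiers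
instance (modifiers : List String) (out : List String) : Decidable (Spec_prioritize_anchor_modifiers_py modifiers out) := by unfold Spec_prioritize_anchor_modifiers_py; infer_instance

-- ===== CLAIM (what is proved, stated in full; the proofs are below) =====
def Claim_equal_prioritize_anchor_modifiers_py : Prop := ∀ (modifiers : List String), Dom_prioritize_anchor_modifiers_py modifiers → Spec_prioritize_anchor_modifiers_py modifiers (prioritize_anchor_modifiers_py modifiers)

-- ===== LEMMAS AND PROOFS =====

-- the cleaning applied to each element
def pvClean (s : String) : String := PySem.Str.lower (PySem.Str.strip s)

-- A's loop step / B's loop step, named for the proofs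
def pvAStep (st : List String × PySem.Set String) (modifier : String) :
    List String × PySem.Set String :=
  let mod := pvClean modifier
  if mod ≠ "" && !(PySem.Set.contains st.2 mod) then (st.1 ++ [mod], PySem.Set.add st.2 mod)
  else st

def pvBStep (s : PySem.Set String) (modifier : String) : PySem.Set String :=
  if pvClean modifier ≠ "" then PySem.Set.add s (pvClean modifier) else s

-- A's dictionary as a term
def pvPriorityDict : PySem.Dict String Int := PySem.Dict.ofList
  [("organic", 0), ("natural", 1), ("premium", 2), ("bulk", 3),
   ("wholesale", 4), ("supplier", 5), ("online", 6), ("price", 7)]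

-- the lexicographic sort key of A
def pvKey (m : String) : Lex (Int × String) := toLex (pvPriorityDict.getD m 100, m)

lemma pvAStep_eq (s : PySem.Set String) (m : String) :
    pvAStep (s, s) m = (pvBStep s m, pvBStep s m) := by
  rcases eq_or_ne (pvClean m) "" with hne | hne
  · simp [pvAStep, pvBStep, hne]
  · by_cases hmem : pvClean m ∈ s
    · simp [pvAStep, pvBStep, hne, hmem]
    · simp [pvAStep, pvBStep, hne, hmem]

lemma pvFoldA_eq (ms : List String) (s : PySem.Set String) :
    ms.foldl pvAStep (s, s) = (ms.foldl pvBStep s, ms.foldl pvBStep s) := by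
  induction ms generalizing s with
  | nil => rfl
  | cons m ms ih => simp only [List.foldl_cons, pvAStep_eq]; exact ih _

lemma pvFoldB_nodup (ms : List String) (s : PySem.Set String) (h : s.Nodup) :
    (ms.foldl pvBStep s).Nodup := by
  induction ms generalizing s with
  | nil => exact h
  | cons m ms ih =>
      simp only [List.foldl_cons]
      have hs : (pvBStep s m).Nodup := by
        unfold pvBStep
        split
        · exact PySem.Set.nodup_add _ _ h
        · exact h
      exact ih (pvBStep s m) hs

-- the Boolean comparison of sorted2 is the lexicographic-pair comparison
lemma pvBefore_eq (k1 : String → Int) :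
    (fun a b : String => decide (k1 a < k1 b) || (!decide (k1 b < k1 a) && decide (a < b)))
    = fun a b => decide (toLex (k1 a, a) < toLex (k1 b, b)) := by
  funext a b
  rcases lt_trichotomy (k1 a) (k1 b) with h | h | h
  · simp [Prod.Lex.toLex_lt_toLex, h]
  · simp [Prod.Lex.toLex_lt_toLex, h]
  · simp [Prod.Lex.toLex_lt_toLex, h, not_lt_of_gt h, h.ne']

-- sorted2 with an Int first key and the element itself as second key is sorted by the lex pair
lemma pvSorted2_eq_sorted_lex (xs : List String) (k1 : String → Int) :
    PySem.List.sorted2 xs k1 (fun m => m) false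
    = PySem.List.sorted xs (fun m => toLex (k1 m, m)) false := by
  rw [PySem.List.sorted_eq_foldl_insertBy]
  show List.foldl (fun acc x => PySem.List.insertBy
      (fun a b => decide (k1 a < k1 b) || (!decide (k1 b < k1 a) && decide (a < b))) x acc) [] xs
    = _
  rw [pvBefore_eq]

lemma pvKeys_eq : pvPriorityDict.keys = pvPriorityOrder := by decide

lemma pvGetD_of_not_mem {m : String} (h : m ∉ pvPriorityOrder) :
    pvPriorityDict.getD m 100 = 100 := by
  apply PySem.Dict.getD_of_not_contains
  rw [Bool.eq_false_iff]
  intro hc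
  exact h (pvKeys_eq ▸ (PySem.Dict.contains_iff_mem_keys _ _).mp hc)

lemma pvGetD_lt_of_mem {m : String} (h : m ∈ pvPriorityOrder) :
    pvPriorityDict.getD m 100 < 100 := by
  fin_cases h <;> decide

lemma pvNodup_priorityOrder : pvPriorityOrder.Nodup := by decide

-- pairwise strict key order on the priority list itself
lemma pvPairwise_head : pvPriorityOrder.Pairwise (fun a b => pvKey a < pvKey b) := by
  simp only [pvKey, Prod.Lex.toLex_lt_toLex]
  decide

-- ===== VERDICT (by name: the statement is the Claim_ definition above) =====
theorem prioritize_anchor_modifiers_py_spec : Claim_equal_prioritize_anchor_modifiers_py := by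
  intro ms _
  unfold Spec_prioritize_anchor_modifiers_py
  have hA : prioritize_anchor_modifiers_py ms
      = PySem.List.sorted2 (ms.foldl pvAStep ([], [])).1
          (fun m => pvPriorityDict.getD m 100) (fun m => m) false := rfl
  set u : PySem.Set String := ms.foldl pvBStep [] with hu
  have hB : prioritize_anchor_modifiers_py_alt ms
      = pvPriorityOrder.filter (fun w => PySem.Set.contains u w)
        ++ PySem.List.sorted (PySem.Set.diff u pvPriorityOrder) (fun x => x) false := rfl
  set head := pvPriorityOrder.filter (fun w => PySem.Set.contains u w) with hhead
  set tail := PySem.List.sorted (PySem.Set.diff u pvPriorityOrder) (fun x => x) false with htail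
  have hUnod : u.Nodup := pvFoldB_nodup ms [] List.nodup_nil
  have hA2 : prioritize_anchor_modifiers_py ms = PySem.List.sorted u pvKey false := by
    rw [hA, pvFoldA_eq, pvSorted2_eq_sorted_lex]
    rfl
  rw [hA2, hB]
  -- membership facts
  have hmem_head : ∀ x, x ∈ head ↔ x ∈ pvPriorityOrder ∧ x ∈ u := by
    intro x
    simp [hhead, List.mem_filter]
  have htail_diff : tail.Perm (PySem.Set.diff u pvPriorityOrder) :=
    PySem.List.sorted_perm _ _ _
  have hmem_tail : ∀ x, x ∈ tail ↔ x ∈ u ∧ x ∉ pvPriorityOrder := by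
    intro x
    rw [htail_diff.mem_iff, PySem.Set.mem_diff]
  -- the permutation
  have hperm : (head ++ tail).Perm u := by
    have h1 : head.Perm (u.filter (fun x => decide (x ∈ pvPriorityOrder))) := by
      rw [List.perm_ext_iff_of_nodup (pvNodup_priorityOrder.filter _) (hUnod.filter _)]
      intro x
      rw [hmem_head x]
      simp [List.mem_filter, and_comm]
    have h2 : tail.Perm (u.filter (fun x => !decide (x ∈ pvPriorityOrder))) := by
      rw [List.perm_ext_iff_of_nodup (htail_diff.symm.nodup (PySem.Set.nodup_diff _ _ hUnod))
        (hUnod.filter _)]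
      intro x
      rw [hmem_tail x]
      simp [List.mem_filter]
    exact (h1.append h2).trans (List.filter_append_perm _ u)
  -- pairwise strict order on head ++ tail
  have hpw : (head ++ tail).Pairwise (fun a b => pvKey a < pvKey b) := by
    rw [List.pairwise_append]
    refine ⟨List.Pairwise.sublist List.filter_sublist pvPairwise_head, ?_, ?_⟩
    · have hle : tail.Pairwise (fun a b : String => a ≤ b) :=
        PySem.List.sorted_pairwise _ _
      have hne : tail.Pairwise (fun a b : String => a ≠ b) :=
        htail_diff.symm.nodup (PySem.Set.nodup_diff _ _ hUnod)
      have hlt : tail.Pairwise (fun a b : String => a < b) :=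
        (hle.and hne).imp (fun h => lt_of_le_of_ne h.1 h.2)
      refine hlt.imp_of_mem ?_
      intro a b ha hb hab
      have hna : a ∉ pvPriorityOrder := ((hmem_tail a).mp ha).2
      have hnb : b ∉ pvPriorityOrder := ((hmem_tail b).mp hb).2
      unfold pvKey
      rw [Prod.Lex.toLex_lt_toLex]
      exact Or.inr ⟨by rw [pvGetD_of_not_mem hna, pvGetD_of_not_mem hnb], hab⟩
    · intro a ha b hb
      have hpa : a ∈ pvPriorityOrder := ((hmem_head a).mp ha).1
      have hnb : b ∉ pvPriorityOrder := ((hmem_tail b).mp hb).2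
      unfold pvKey
      rw [Prod.Lex.toLex_lt_toLex]
      exact Or.inl (by rw [pvGetD_of_not_mem hnb]; exact pvGetD_lt_of_mem hpa)
  exact PySem.List.sorted_eq_of_perm_of_pairwise_lt u (head ++ tail) pvKey hperm hpw
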